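-- pv_equiv track=rewrite | github.com/BOLTB0X/DataStructure_Argolithm | BOJ/자료구조/Stack/3986.py | solution
-- ===== SOURCE A (Python) =====
-- def solution(n, words):
--     res = 0
--
--     for word in words:
--         stack = []
--
--         for w in word:
--             if stack and stack[-1] == w:
--                 stack.pop()
--             else:
--                 stack.append(w)
--
--         if not stack:
--             res += 1
--
--     return res
-- ===== SOURCE B (Python) =====
-- def solution(n, words):
--     res = 0
--     for word in words:
--         cur = list(word)
--         changed = True
--         while changed:
--             changed = False
--             out = []
--             i = 0
--             while i < len(cur):
--                 if i + 1 < len(cur) and cur[i] == cur[i + 1]: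
--                     i += 2
--                     changed = True
--                 else:
--                     out.append(cur[i])
--                     i += 1
--             cur = out
--         if not cur:
--             res += 1
--     return res
-- ===== Notes on version B (the rewrite author's own statement) =====
-- stated objective: alternative
-- what changed: Replaces the single stack pass per word by repeated full left-to-right passes that delete adjacent equal pairs until a pass removes nothing; emptiness of the fixpoint equals emptiness of the stack by uniqueness of the reduced form.
import Mathlib
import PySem

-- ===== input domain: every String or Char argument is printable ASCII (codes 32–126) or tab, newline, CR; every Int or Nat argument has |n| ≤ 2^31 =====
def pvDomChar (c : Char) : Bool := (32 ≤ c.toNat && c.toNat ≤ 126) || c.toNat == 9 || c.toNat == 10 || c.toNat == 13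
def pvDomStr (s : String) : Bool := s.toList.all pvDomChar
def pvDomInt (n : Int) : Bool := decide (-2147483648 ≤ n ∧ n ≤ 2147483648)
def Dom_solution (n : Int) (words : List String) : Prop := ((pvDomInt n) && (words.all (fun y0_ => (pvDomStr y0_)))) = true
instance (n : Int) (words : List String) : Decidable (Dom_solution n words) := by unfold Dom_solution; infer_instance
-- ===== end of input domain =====

-- B replaces A's one stack pass per word by repeated full adjacent-pair-deletion passes
-- until a fixpoint (objective: alternative decomposition, not faster).

-- ===== PORT A =====
-- one step of A's inner loop: `if stack and stack[-1] == w: stack.pop() else: stack.append(w)`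
def pvStepA (stack : List Char) (c : Char) : List Char :=
  if stack ≠ [] ∧ stack.getLast? = some c then stack.dropLast else stack ++ [c]

def solution (_n : Int) (words : List String) : Int :=
  words.foldl (fun res word =>
    let stack := word.toList.foldl pvStepA []
    if stack = [] then res + 1 else res) 0

-- ===== PORT B =====
-- one full left-to-right pass of Source B's inner while: returns (out, changed)
def pvPass : List Char → List Char × Bool
  | [] => ([], false)
  | [x] => ([x], false)
  | x :: y :: t =>
    if x = y then ((pvPass t).1, true)
    else ((x :: (pvPass (y :: t)).1), (pvPass (y :: t)).2)

theorem pvPass_len_le : ∀ l : List Char, (pvPass l).1.length ≤ l.length := by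
  intro l
  induction l using pvPass.induct with
  | case1 => simp [pvPass]
  | case2 x => simp [pvPass]
  | case3 y t ih => simp [pvPass]; omega
  | case4 x y t h ih =>
    simp [pvPass, h]
    simp only [List.length_cons] at ih
    omega

theorem pvPass_len_lt : ∀ l : List Char, (pvPass l).2 = true → (pvPass l).1.length < l.length := by
  intro l
  induction l using pvPass.induct with
  | case1 => simp [pvPass]
  | case2 x => simp [pvPass]
  | case3 y t _ =>
    intro _
    have := pvPass_len_le t
    simp [pvPass]; omega
  | case4 x y t h ih =>
    have e : pvPass (x :: y :: t) = ((x :: (pvPass (y :: t)).1), (pvPass (y :: t)).2) := by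
      simp [pvPass, h]
    rw [e]
    intro hch
    have := ih hch
    simp only [List.length_cons] at *
    omega

-- Source B's outer while: repeat passes while a pass removed something
def pvFix (cur : List Char) : List Char :=
  let p := pvPass cur
  if h : p.2 = true then pvFix p.1 else p.1
termination_by cur.length
decreasing_by exact pvPass_len_lt cur h

def solution_alt (_n : Int) (words : List String) : Int :=
  words.foldl (fun res word =>
    if pvFix word.toList = [] then res + 1 else res) 0

-- ===== PRECONDITION & SPEC =====
def Spec_solution (n : Int) (words : List String) (out : Int) : Prop := out = solution_alt n words
instance (n : Int) (words : List String) (out : Int) : Decidable (Spec_solution n words out) := by unfold Spec_solution; infer_instance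

-- ===== CLAIM (what is proved, stated in full; the proofs are below) =====
def Claim_equal_solution : Prop := ∀ (n : Int) (words : List String), Dom_solution n words → Spec_solution n words (solution n words)

-- ===== LEMMAS AND PROOFS =====

-- The common yardstick: head-cancellation and the reduced normal form of a word.
def pvCancel (c : Char) : List Char → List Char
  | [] => [c]
  | h :: t => if h = c then t else c :: h :: t

def pvReduce (l : List Char) : List Char := l.foldr pvCancel []

-- tail-cancellation (what A's stack step does)
def pvRCancel : List Char → Char → List Char
  | [], c => [c]
  | [x], c => if x = c then [] else [x, c]
  | x :: y :: t, c => x :: pvRCancel (y :: t) c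

theorem stepA_eq_rcancel : ∀ (s : List Char) (c : Char), pvStepA s c = pvRCancel s c := by
  intro s
  induction s with
  | nil => intro c; simp [pvStepA, pvRCancel]
  | cons x t ih =>
    intro c
    cases t with
    | nil =>
      by_cases h : x = c <;> simp [pvStepA, pvRCancel, h]
    | cons y t' =>
      rw [show pvRCancel (x :: y :: t') c = x :: pvRCancel (y :: t') c from rfl, ← ih c]
      by_cases hg : (y :: t').getLast? = some c
      · simp [pvStepA, hg, List.getLast?_cons_cons, List.dropLast_cons₂]
      · simp [pvStepA, hg, List.getLast?_cons_cons]

theorem cancel_rcancel_comm (d c : Char) : ∀ r : List Char,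
    pvCancel d (pvRCancel r c) = pvRCancel (pvCancel d r) c := by
  intro r
  match r with
  | [] =>
    by_cases h : c = d
    · subst h; simp [pvCancel, pvRCancel]
    · simp [pvCancel, pvRCancel, h, Ne.symm h]
  | [x] =>
    by_cases h1 : x = c <;> by_cases h2 : x = d
    · subst h1; subst h2; simp [pvCancel, pvRCancel]
    · subst h1; simp [pvCancel, pvRCancel, h2]
    · subst h2; simp [pvCancel, pvRCancel, h1]
    · simp [pvCancel, pvRCancel, h1, h2]
  | x :: y :: t =>
    by_cases h : x = d
    · subst h; simp [pvCancel, pvRCancel]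
    · simp [pvCancel, pvRCancel, h]

theorem reduce_append_single (c : Char) : ∀ w : List Char,
    pvReduce (w ++ [c]) = pvRCancel (pvReduce w) c := by
  intro w
  induction w with
  | nil => simp [pvReduce, pvCancel, pvRCancel]
  | cons d v ih =>
    show pvCancel d (pvReduce (v ++ [c])) = pvRCancel (pvCancel d (pvReduce v)) c
    rw [ih, cancel_rcancel_comm]

theorem reduce_eq_foldl_rcancel : ∀ w : List Char, pvReduce w = w.foldl pvRCancel [] := by
  intro w
  induction w using List.reverseRecOn with
  | nil => simp [pvReduce]
  | append_singleton v c ih =>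
    rw [reduce_append_single, ih, List.foldl_append]
    simp

-- a word with no adjacent equal pair
def pvReduced (l : List Char) : Prop := List.IsChain (· ≠ ·) l

theorem pvReduced_tail {h : Char} {t : List Char} (hr : pvReduced (h :: t)) : pvReduced t := by
  cases t with
  | nil => exact .nil
  | cons b l => exact (List.isChain_cons_cons.mp hr).2

theorem reduced_cancel (c : Char) : ∀ r : List Char, pvReduced r → pvReduced (pvCancel c r) := by
  intro r hr
  match r with
  | [] => simp [pvCancel, pvReduced]
  | h :: t =>
    show pvReduced (if h = c then t else c :: h :: t)
    by_cases hh : h = c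
    · simp only [if_pos hh]
      exact pvReduced_tail hr
    · simp only [if_neg hh]
      exact .cons_cons (fun e => hh e.symm) hr

theorem reduced_reduce : ∀ w : List Char, pvReduced (pvReduce w) := by
  intro w
  induction w with
  | nil => simp [pvReduce, pvReduced]
  | cons c t ih => exact reduced_cancel c _ ih

theorem cancel_cancel (c : Char) : ∀ r : List Char, pvReduced r → pvCancel c (pvCancel c r) = r := by
  intro r hr
  match r with
  | [] => simp [pvCancel]
  | h :: t =>
    by_cases hh : h = c
    · subst hh
      rw [show pvCancel h (h :: t) = t from by simp [pvCancel]]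
      cases t with
      | nil => simp [pvCancel]
      | cons h2 t2 =>
        have hne : h ≠ h2 := List.rel_of_isChain_cons_cons hr
        simp [pvCancel, Ne.symm hne]
    · simp [pvCancel, hh]

theorem reduce_pass : ∀ w : List Char, pvReduce (pvPass w).1 = pvReduce w := by
  intro w
  induction w using pvPass.induct with
  | case1 => simp [pvPass]
  | case2 x => simp [pvPass]
  | case3 y t ih =>
    have e : (pvPass (y :: y :: t)).1 = (pvPass t).1 := by simp [pvPass]
    rw [e, ih]
    show pvReduce t = pvCancel y (pvCancel y (pvReduce t))
    rw [cancel_cancel y (pvReduce t) (reduced_reduce t)]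
  | case4 x y t h ih =>
    have e : (pvPass (x :: y :: t)).1 = x :: (pvPass (y :: t)).1 := by simp [pvPass, h]
    rw [e]
    show pvCancel x (pvReduce (pvPass (y :: t)).1) = pvCancel x (pvReduce (y :: t))
    rw [ih]

theorem pass_false : ∀ w : List Char, (pvPass w).2 = false → (pvPass w).1 = w ∧ pvReduced w := by
  intro w
  induction w using pvPass.induct with
  | case1 => simp [pvPass, pvReduced]
  | case2 x => simp [pvPass, pvReduced]
  | case3 y t _ => simp [pvPass]
  | case4 x y t h ih =>
    have e : pvPass (x :: y :: t) = ((x :: (pvPass (y :: t)).1), (pvPass (y :: t)).2) := by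
      simp [pvPass, h]
    rw [e]
    intro hch
    obtain ⟨h1, h2⟩ := ih hch
    exact ⟨by rw [h1], .cons_cons h h2⟩

theorem reduced_fixed : ∀ r : List Char, pvReduced r → pvReduce r = r := by
  intro r
  induction r with
  | nil => intro _; simp [pvReduce]
  | cons c t ih =>
    intro hr
    have ht : pvReduce t = t := ih (pvReduced_tail hr)
    show pvCancel c (pvReduce t) = c :: t
    rw [ht]
    cases t with
    | nil => simp [pvCancel]
    | cons h2 t2 =>
      have hne : c ≠ h2 := List.rel_of_isChain_cons_cons hr
      simp [pvCancel, Ne.symm hne]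

theorem fix_eq_reduce_aux : ∀ (n : Nat) (w : List Char), w.length ≤ n → pvFix w = pvReduce w := by
  intro n
  induction n with
  | zero =>
    intro w hw
    have hnil : w = [] := List.eq_nil_of_length_eq_zero (Nat.le_zero.mp hw)
    subst hnil
    rw [pvFix]
    simp [pvPass, pvReduce]
  | succ n ih =>
    intro w hw
    rw [pvFix]
    show (if _ : (pvPass w).2 = true then pvFix (pvPass w).1 else (pvPass w).1) = pvReduce w
    by_cases hch : (pvPass w).2 = true
    · rw [dif_pos hch]
      have hlt : (pvPass w).1.length ≤ n := by
        have := pvPass_len_lt w hch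
        omega
      rw [ih _ hlt, reduce_pass]
    · rw [dif_neg hch]
      have hf : (pvPass w).2 = false := by simpa using hch
      obtain ⟨h1, h2⟩ := pass_false w hf
      rw [h1, reduced_fixed w h2]

theorem fix_eq_reduce (w : List Char) : pvFix w = pvReduce w :=
  fix_eq_reduce_aux w.length w le_rfl

theorem foldl_ext {α β : Type} (f g : β → α → β) (h : ∀ b a, f b a = g b a) :
    ∀ (l : List α) (b : β), List.foldl f b l = List.foldl g b l := by
  intro l
  induction l with
  | nil => intro b; rfl
  | cons a t ih => intro b; rw [List.foldl_cons, List.foldl_cons, h, ih]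

theorem stack_eq_reduce (w : List Char) : w.foldl pvStepA [] = pvReduce w := by
  rw [reduce_eq_foldl_rcancel]
  exact foldl_ext pvStepA pvRCancel stepA_eq_rcancel w []

-- ===== VERDICT (by name: the statement is the Claim_ definition above) =====
theorem solution_spec : Claim_equal_solution := by
  intro n words _
  show solution n words = solution_alt n words
  unfold solution solution_alt
  exact foldl_ext _ _ (fun res word => by
    simp only [stack_eq_reduce, fix_eq_reduce]) words 0
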